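-- pv_equiv track=rewrite | github.com/karoljanic/jftt | lista1/FA.py | build_automata
-- ===== SOURCE A (Python) =====
-- from typing import List, Dict
--
-- def is_sufix(string: str, sufix: str) -> bool:
--     if len(string) < len(sufix):
--         return False
--
--     for index in range(1, len(sufix) + 1):
--         if string[-index] != sufix[-index]:
--             return False
--
--     return True
--
-- def build_automata(pattern: str) -> List[Dict]:
--     patter_len = len(pattern)
--     alphabet = set(pattern)
--     automata = [dict() for _ in range(patter_len + 1)]
--
--     for state in range(patter_len + 1):
--         for letter in alphabet:
--             next_state = min(patter_len, state + 1)
--             while next_state > 0 and not is_sufix(pattern[:state] + letter, pattern[:next_state]):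
--                 next_state -= 1
--
--             automata[state][letter] = next_state
--
--
--     return automata
-- ===== SOURCE B (Python) =====
-- def build_automata(pattern):
--     # KMP-style construction: O(m*|alphabet|) by copying transitions from the
--     # fallback (failure) state instead of rescanning suffixes per entry.
--     m = len(pattern)
--     alphabet = set(pattern)
--     rows = [{c: (1 if m > 0 and c == pattern[0] else 0) for c in alphabet}]
--     x = 0
--     for j in range(1, m + 1):
--         prev = rows[x]
--         rows.append({c: (j + 1 if j < m and c == pattern[j] else prev[c]) for c in alphabet})
--         if j < m:
--             x = prev[pattern[j]]
--     return rows
-- ===== Notes on version B (the rewrite author's own statement) =====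
-- stated objective: faster
-- what changed: Replaces the per-(state,letter) decrementing while-loop with quadratic suffix tests by the KMP automaton construction that fills each state's row by copying transitions from the failure (fallback) state's already-built row.
import Mathlib
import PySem

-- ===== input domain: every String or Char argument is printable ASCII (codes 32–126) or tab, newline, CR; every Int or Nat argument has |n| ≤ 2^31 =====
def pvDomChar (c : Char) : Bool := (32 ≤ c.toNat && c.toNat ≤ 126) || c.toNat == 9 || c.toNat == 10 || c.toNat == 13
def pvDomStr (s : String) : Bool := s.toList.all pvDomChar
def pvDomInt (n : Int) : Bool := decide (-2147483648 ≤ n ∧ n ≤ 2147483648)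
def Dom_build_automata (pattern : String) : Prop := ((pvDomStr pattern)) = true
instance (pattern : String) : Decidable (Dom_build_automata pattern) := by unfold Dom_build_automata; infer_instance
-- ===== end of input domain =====

-- B replaces A's per-(state,letter) decrementing suffix-rescan loop with the KMP automaton
-- construction (each row copied from the failure state's row); objective: faster.
-- Each inner dict is returned as its items list; set/dict iteration order is modelled as
-- first-occurrence order (both ports use the same order).

-- ===== PORT A =====
-- is_sufix: backwards character scan with negative indexing (pyGet?), literal
def is_sufix (string sufix : List Char) : Bool :=
  if string.length < sufix.length then false
  else (PySem.List.pyRange 1 ((sufix.length : Int) + 1) 1).all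
    (fun index => PySem.List.pyGet? string (-index) == PySem.List.pyGet? sufix (-index))

-- the 'while next_state > 0 and not is_sufix(...)' decrement loop of A
def pvWhile (pattern cand : List Char) : Nat → Nat
  | 0 => 0
  | n + 1 => if is_sufix cand (pattern.take (n + 1)) then n + 1 else pvWhile pattern cand n

def build_automata (pattern : String) : List (List (String × Int)) :=
  let p := pattern.toList
  let patter_len := p.length
  let alphabet := PySem.Set.ofList p
  (List.range (patter_len + 1)).map (fun state =>
    (alphabet.foldl
      (fun d letter =>
        PySem.Dict.insert d (String.ofList [letter])
          ((pvWhile p (p.take state ++ [letter]) (min patter_len (state + 1)) : Int)))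
      PySem.Dict.empty).items)

-- ===== PORT B =====
-- dict lookup prev[c] on a row (keys always present, so the default is never hit)
def pvRowLookup (row : List (String × Int)) (k : String) : Int :=
  (List.lookup k row).getD 0

-- body of B's 'for j in range(1, m+1)' loop (j = i+1), carrying (rows, x)
def pvAltStep (p : List Char) (m : Nat) (alphabet : List Char)
    (st : List (List (String × Int)) × Nat) (i : Nat) :
    List (List (String × Int)) × Nat :=
  let j := i + 1
  let prev := st.1.getD st.2 []
  let row := alphabet.map (fun c =>
    (String.ofList [c],
      if j < m ∧ p[j]? = some c then ((j : Int) + 1)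
      else pvRowLookup prev (String.ofList [c])))
  (st.1 ++ [row],
   if j < m then (pvRowLookup prev (String.ofList [p.getD j ' '])).toNat else st.2)

def build_automata_alt (pattern : String) : List (List (String × Int)) :=
  let p := pattern.toList
  let m := p.length
  let alphabet := PySem.Set.ofList p
  let row0 := alphabet.map (fun c =>
    (String.ofList [c], if 0 < m ∧ p[0]? = some c then (1 : Int) else 0))
  ((List.range m).foldl (pvAltStep p m alphabet) ([row0], 0)).1

-- ===== PRECONDITION & SPEC =====
def Spec_build_automata (pattern : String) (out : List (List (String × Int))) : Prop := out = build_automata_alt pattern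
instance (pattern : String) (out : List (List (String × Int))) : Decidable (Spec_build_automata pattern out) := by unfold Spec_build_automata; infer_instance

-- ===== CLAIM (what is proved, stated in full; the proofs are below) =====
def Claim_equal_build_automata : Prop := ∀ (pattern : String), Dom_build_automata pattern → Spec_build_automata pattern (build_automata pattern)

-- ===== LEMMAS AND PROOFS =====

-- the value both programs compute at (state, letter): the largest k ≤ min |p| |s|
-- with p.take k a suffix of s, where s = p.take state ++ [letter]
def pvF (p s : List Char) : Nat :=
  Nat.findGreatest (fun k => p.take k <:+ s) (min p.length s.length)

-- A's row at state q, as a map over the alphabet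
def pvRowA (p : List Char) (q : Nat) : List (String × Int) :=
  (PySem.Set.ofList p).map (fun c => (String.ofList [c], (pvF p (p.take q ++ [c]) : Int)))

lemma pvSuffix_concat_iff {u v : List Char} {a b : Char} :
    u ++ [a] <:+ v ++ [b] ↔ a = b ∧ u <:+ v := by
  rw [← List.reverse_prefix]
  simp [List.cons_prefix_cons]

lemma pvSuffix_of_suffix_length_le {u v s : List Char}
    (hu : u <:+ s) (hv : v <:+ s) (h : u.length ≤ v.length) : u <:+ v := by
  have hvs := hv.length_le
  have hu' := List.suffix_iff_eq_drop.mp hu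
  have hv' := List.suffix_iff_eq_drop.mp hv
  have e1 : v.drop (v.length - u.length)
      = (s.drop (s.length - v.length)).drop (v.length - u.length) := by rw [← hv']
  have e2 : (s.drop (s.length - v.length)).drop (v.length - u.length)
      = s.drop (s.length - u.length) := by
    rw [List.drop_drop]; congr 1; omega
  have : u = v.drop (v.length - u.length) := by rw [e1, e2, ← hu']
  rw [this]
  exact List.drop_suffix _ _

lemma pvTake_suffix_concat_iff {p s : List Char} {c : Char} {k : Nat}
    (hk : 0 < k) (hkm : k ≤ p.length) :
    (p.take k <:+ s ++ [c]) ↔ p[k-1]? = some c ∧ p.take (k-1) <:+ s := by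
  have hlt : k - 1 < p.length := by omega
  have hdec : p.take k = p.take (k-1) ++ [p[k-1]] := by
    conv_lhs => rw [show k = (k-1) + 1 by omega]
    rw [List.take_succ_eq_append_getElem hlt]
  rw [hdec, pvSuffix_concat_iff, List.getElem?_eq_getElem hlt]
  simp [eq_comm]

lemma pvFg_mono_dir (P Q : Nat → Prop) [DecidablePred P] [DecidablePred Q] (n₁ n₂ : Nat)
    (hP0 : P 0)
    (h : ∀ k, 0 < k → (k ≤ n₁ ∧ P k) → (k ≤ n₂ ∧ Q k)) :
    Nat.findGreatest P n₁ ≤ Nat.findGreatest Q n₂ := by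
  rcases Nat.eq_zero_or_pos (Nat.findGreatest P n₁) with h0 | hpos
  · omega
  · have hP : P (Nat.findGreatest P n₁) := Nat.findGreatest_spec (Nat.zero_le n₁) hP0
    have hle := Nat.findGreatest_le (P := P) n₁
    obtain ⟨h2, hQ⟩ := h _ hpos ⟨hle, hP⟩
    exact Nat.le_findGreatest h2 hQ

lemma pvFg_congr (P Q : Nat → Prop) [DecidablePred P] [DecidablePred Q] (n₁ n₂ : Nat)
    (hP0 : P 0) (hQ0 : Q 0)
    (h : ∀ k, 0 < k → ((k ≤ n₁ ∧ P k) ↔ (k ≤ n₂ ∧ Q k))) :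
    Nat.findGreatest P n₁ = Nat.findGreatest Q n₂ :=
  le_antisymm (pvFg_mono_dir P Q n₁ n₂ hP0 (fun k hk => (h k hk).mp))
    (pvFg_mono_dir Q P n₂ n₁ hQ0 (fun k hk => (h k hk).mpr))

-- the fallback identity behind KMP: extending s by c only needs the longest border of s
lemma pvF_concat_fallback (p s : List Char) (c : Char) :
    pvF p (s ++ [c]) = pvF p (p.take (pvF p s) ++ [c]) := by
  have ht_le : pvF p s ≤ min p.length s.length := Nat.findGreatest_le _
  have hts : p.take (pvF p s) <:+ s := by
    unfold pvF
    exact Nat.findGreatest_spec (P := fun k => p.take k <:+ s) (Nat.zero_le _)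
      (show List.take 0 p <:+ s from List.nil_suffix)
  set t := pvF p s with htdef
  have hlen2 : (p.take t).length = t := by simp; omega
  unfold pvF
  apply pvFg_congr _ _ _ _ (by simp) (by simp)
  intro k hk
  have hL1 : (s ++ [c]).length = s.length + 1 := by simp
  have hL2 : (p.take t ++ [c]).length = t + 1 := by simp [hlen2]
  rw [hL1, hL2]
  constructor
  · rintro ⟨hb, hs⟩
    have hkm : k ≤ p.length := by omega
    rw [pvTake_suffix_concat_iff hk hkm] at hs
    obtain ⟨hc, hsuf⟩ := hs
    have hlen : (p.take (k-1)).length = k - 1 := by simp; omega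
    have hk1s : k - 1 ≤ s.length := by have := hsuf.length_le; rw [hlen] at this; exact this
    have hk1t : k - 1 ≤ t := Nat.le_findGreatest (by omega) hsuf
    have htk : p.take (k-1) <:+ p.take t :=
      pvSuffix_of_suffix_length_le hsuf hts (by rw [hlen, hlen2]; omega)
    exact ⟨by omega, (pvTake_suffix_concat_iff hk hkm).mpr ⟨hc, htk⟩⟩
  · rintro ⟨hb, hs⟩
    have hkm : k ≤ p.length := by omega
    rw [pvTake_suffix_concat_iff hk hkm] at hs
    obtain ⟨hc, hsuf⟩ := hs
    have hss : p.take (k-1) <:+ s := hsuf.trans hts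
    have hlen : (p.take (k-1)).length = k - 1 := by simp; omega
    have hk1s : k - 1 ≤ s.length := by have := hss.length_le; rw [hlen] at this; exact this
    exact ⟨by omega, (pvTake_suffix_concat_iff hk hkm).mpr ⟨hc, hss⟩⟩

-- the window identity: only the last j characters of p.take j ++ [c] matter
lemma pvF_window (p : List Char) (c : Char) (j : Nat) (h1 : 1 ≤ j) (h2 : j ≤ p.length) :
    pvF p (p.take j ++ [c]) =
      if j < p.length ∧ p[j]? = some c then j + 1
      else pvF p ((p.take j).tail ++ [c]) := by
  have hlenj : (p.take j).length = j := by simp; omega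
  split
  · rename_i hcond
    obtain ⟨hjm, hpj⟩ := hcond
    unfold pvF
    have hb : min p.length (p.take j ++ [c]).length = j + 1 := by simp [hlenj]; omega
    rw [hb]
    have hP : p.take (j+1) <:+ p.take j ++ [c] := by
      rw [pvTake_suffix_concat_iff (by omega) (by omega)]
      simpa using hpj
    exact le_antisymm (Nat.findGreatest_le _) (Nat.le_findGreatest (le_refl _) hP)
  · rename_i hcond
    unfold pvF
    apply pvFg_congr _ _ _ _ (by simp) (by simp)
    intro k hk
    have htail : ((p.take j).tail ++ [c]).length = j := by simp [hlenj]; omega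
    rw [htail]
    have hLt : (p.take j).tail <:+ p.take j := List.tail_suffix _
    have hlent : ((p.take j).tail).length = j - 1 := by simp [hlenj]
    constructor
    · rintro ⟨hb, hs⟩
      have hbm : k ≤ min p.length ((p.take j ++ [c]).length) := hb
      have hkm : k ≤ p.length := by simp [hlenj] at hbm; omega
      have hkj1 : k ≤ j + 1 := by simp [hlenj] at hbm; omega
      rw [pvTake_suffix_concat_iff hk hkm] at hs
      obtain ⟨hc, hsuf⟩ := hs
      have hkj : k ≤ j := by
        by_contra hgt
        have hkeq : k = j + 1 := by omega
        subst hkeq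
        simp at hc
        exact hcond ⟨by omega, by simpa using hc⟩
      have hsub : p.take (k-1) <:+ (p.take j).tail := by
        apply pvSuffix_of_suffix_length_le hsuf hLt
        rw [hlent]
        have : (p.take (k-1)).length = k - 1 := by simp; omega
        rw [this]
        omega
      refine ⟨by omega, ?_⟩
      rw [pvTake_suffix_concat_iff hk hkm]
      exact ⟨hc, hsub⟩
    · rintro ⟨hb, hs⟩
      have hkm : k ≤ p.length := by omega
      rw [pvTake_suffix_concat_iff hk hkm] at hs
      obtain ⟨hc, hsuf⟩ := hs
      refine ⟨by simp [hlenj]; omega, ?_⟩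
      rw [pvTake_suffix_concat_iff hk hkm]
      exact ⟨hc, hsuf.trans hLt⟩

lemma pvF_singleton (p : List Char) (c : Char) :
    pvF p [c] = if p[0]? = some c then 1 else 0 := by
  unfold pvF
  rcases Nat.eq_zero_or_pos p.length with hm | hm
  · have : p = [] := List.length_eq_zero_iff.mp hm
    subst this
    simp
  · have hb : min p.length ([c] : List Char).length = 1 := by simp; omega
    rw [hb, Nat.findGreatest_succ]
    have h1 : (p.take 1 <:+ ([c] : List Char)) ↔ p[0]? = some c := by
      have := pvTake_suffix_concat_iff (p := p) (s := ([] : List Char)) (c := c) (k := 1)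
        (by omega) (by omega)
      simpa using this
    by_cases hp : p[0]? = some c
    · simp [h1, hp]
    · simp [h1, hp]

lemma pvF_nil (p : List Char) : pvF p [] = 0 := by
  unfold pvF
  simp

-- S: is_sufix computes the suffix relation
lemma pvIs_sufix_iff (s t : List Char) : is_sufix s t = true ↔ t <:+ s := by
  unfold is_sufix
  split
  · rename_i hlt
    simp only [Bool.false_eq_true, false_iff]
    intro h
    have := h.length_le
    omega
  · rename_i hge
    have hle : t.length ≤ s.length := by omega
    rw [List.all_eq_true]
    constructor
    · intro h
      rw [List.suffix_iff_eq_drop]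
      have hlen : (s.drop (s.length - t.length)).length = t.length := by simp; omega
      apply List.ext_getElem (by omega)
      intro i h1 h2
      have hmem : ((t.length - i : Nat) : Int) ∈ PySem.List.pyRange 1 ((t.length : Int) + 1) 1 := by
        rw [PySem.List.mem_pyRange_one]
        constructor <;> omega
      have hk := h _ hmem
      rw [PySem.List.pyGet?_neg_natCast s (t.length - i) (by omega) (by omega),
          PySem.List.pyGet?_neg_natCast t (t.length - i) (by omega) (by omega)] at hk
      have hk' : s[s.length - (t.length - i)]? = t[t.length - (t.length - i)]? := eq_of_beq hk
      have e1 : t.length - (t.length - i) = i := by omega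
      have e2 : s.length - (t.length - i) = (s.length - t.length) + i := by omega
      rw [e1, e2] at hk'
      rw [List.getElem_drop]
      have h1' : (s.length - t.length) + i < s.length := by omega
      rw [List.getElem?_eq_getElem h1, List.getElem?_eq_getElem h1'] at hk'
      exact (Option.some.inj hk').symm
    · intro hsuf i hi
      rw [PySem.List.mem_pyRange_one] at hi
      have hik : i = ((i.toNat : Nat) : Int) := by omega
      rw [hik, PySem.List.pyGet?_neg_natCast s i.toNat (by omega) (by omega),
          PySem.List.pyGet?_neg_natCast t i.toNat (by omega) (by omega)]
      rw [beq_iff_eq]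
      obtain ⟨w, hw⟩ := hsuf
      have hlen2 : s.length = w.length + t.length := by rw [← hw]; simp
      have e : s.length - i.toNat = w.length + (t.length - i.toNat) := by omega
      rw [e, ← hw, List.getElem?_append_right (by omega)]
      congr 1
      omega

-- W: the decrement loop computes findGreatest
lemma pvWhile_eq (p cand : List Char) (n : Nat) :
    pvWhile p cand n = Nat.findGreatest (fun k => p.take k <:+ cand) n := by
  induction n with
  | zero => rfl
  | succ n ih =>
    rw [pvWhile, Nat.findGreatest_succ]
    by_cases h : p.take (n + 1) <:+ cand
    · simp [pvIs_sufix_iff, h]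
    · simp [pvIs_sufix_iff, h, ih]

lemma pvStringOfList_inj {a b : Char} (h : String.ofList [a] = String.ofList [b]) : a = b := by
  simpa using congrArg String.toList h

-- dict lookup on a mapped row returns the value at that letter
lemma pvRowLookup_map (al : List Char) (v : Char → Int) (a : Char) (ha : a ∈ al) :
    pvRowLookup (al.map (fun c => (String.ofList [c], v c))) (String.ofList [a]) = v a := by
  induction al with
  | nil => cases ha
  | cons x xs ih =>
    by_cases hx : x = a
    · subst hx
      simp [pvRowLookup]
    · have hne : (String.ofList [a] == String.ofList [x]) = false := by
        apply beq_false_of_ne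
        intro h
        exact hx (pvStringOfList_inj h).symm
      simp only [List.map_cons, pvRowLookup, List.lookup, hne]
      have ha' : a ∈ xs := by
        rcases List.mem_cons.mp ha with h | h
        · exact absurd h.symm hx
        · exact h
      exact ih ha'

-- A's program equals the map of pvRowA rows
lemma pvBuild_automata_eq (pattern : String) :
    build_automata pattern =
      (List.range (pattern.toList.length + 1)).map (pvRowA pattern.toList) := by
  unfold build_automata
  apply List.map_congr_left
  intro q hq
  rw [List.mem_range] at hq
  set p := pattern.toList
  have hfresh := PySem.Dict.items_foldl_insert_fresh
      (PySem.Set.ofList p)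
      (fun a => String.ofList [a])
      (fun a => ((pvWhile p (p.take q ++ [a]) (min p.length (q + 1)) : Nat) : Int))
      PySem.Dict.empty
      (fun a _ => by simp)
      (List.Nodup.map (fun a b hab => pvStringOfList_inj hab) (PySem.Set.nodup_ofList p))
  rw [hfresh, pvRowA,
    show (PySem.Dict.empty : PySem.Dict String Int).items = [] from rfl, List.nil_append]
  apply List.map_congr_left
  intro c _
  have hlen : (p.take q ++ [c]).length = q + 1 := by simp; omega
  simp only [pvWhile_eq]
  unfold pvF
  rw [hlen]

-- B's loop invariant: after n iterations the rows are A's rows 0..n and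
-- x is the automaton state reached on p[1:n+1] (the failure state)
lemma pvAlt_fold_inv (p : List Char) (n : Nat) (hn : n ≤ p.length) :
    (List.range n).foldl (pvAltStep p p.length (PySem.Set.ofList p))
        ([pvRowA p 0], 0) =
      ((List.range (n + 1)).map (pvRowA p),
        pvF p ((p.take (min (n + 1) p.length)).tail)) := by
  induction n with
  | zero =>
    simp only [List.range_zero, List.foldl_nil]
    congr 1
    have htail : (p.take (min 1 p.length)).tail = [] := by
      rcases p with _ | ⟨a, p'⟩
      · simp
      · simp
    rw [htail, pvF_nil]
  | succ n ih =>
    have hn' : n ≤ p.length := by omega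
    rw [List.range_succ, List.foldl_append, List.foldl_cons, List.foldl_nil, ih hn']
    have hmin : min (n + 1) p.length = n + 1 := by omega
    rw [hmin]
    set x := pvF p ((p.take (n + 1)).tail) with hx
    have hlent : ((p.take (n + 1)).tail).length = n := by simp; omega
    have hxle : x ≤ n := by
      have h := Nat.findGreatest_le
        (P := fun k => p.take k <:+ (p.take (n + 1)).tail)
        (min p.length ((p.take (n + 1)).tail.length))
      rw [hx]
      unfold pvF
      omega
    have hprev : ((List.range (n + 1)).map (pvRowA p)).getD x [] = pvRowA p x := by
      rw [List.getD_eq_getElem?_getD, List.getElem?_map, List.getElem?_range (by omega)]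
      rfl
    have hlook : ∀ c ∈ PySem.Set.ofList p,
        pvRowLookup ((PySem.Set.ofList p).map
            (fun c' => (String.ofList [c'], ((pvF p (p.take x ++ [c']) : Nat) : Int))))
          (String.ofList [c])
          = ((pvF p (p.take x ++ [c]) : Nat) : Int) := by
      intro c hc
      exact pvRowLookup_map _ _ _ hc
    have hfall : ∀ c, pvF p ((p.take (n + 1)).tail ++ [c]) = pvF p (p.take x ++ [c]) := by
      intro c
      rw [hx]
      exact pvF_concat_fallback p ((p.take (n + 1)).tail) c
    conv_rhs => rw [show n + 1 + 1 = (n + 1) + 1 from rfl, List.range_succ]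
    rw [List.map_append, List.map_cons, List.map_nil]
    unfold pvAltStep
    simp only [hprev]
    congr 1
    · -- the appended row is A's row n+1
      congr 1
      congr 1
      rw [pvRowA]
      apply List.map_congr_left
      intro c hc
      have hw := pvF_window p c (n + 1) (by omega) hn
      rw [hlook c hc, hw, ← hfall c]
      split
      · simp
      · rfl
    · -- the new failure state
      by_cases hjlt : n + 1 < p.length
      · simp only [if_pos hjlt]
        have hmin2 : min (n + 1 + 1) p.length = n + 2 := by omega
        rw [hmin2]
        have hgd : p.getD (n + 1) ' ' = p[n + 1] := List.getD_eq_getElem p ' ' hjlt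
        have hmemj : p[n + 1] ∈ PySem.Set.ofList p := by
          rw [PySem.Set.mem_ofList]
          exact List.getElem_mem hjlt
        rw [hgd, show pvRowA p x = (PySem.Set.ofList p).map
            (fun c' => (String.ofList [c'], ((pvF p (p.take x ++ [c']) : Nat) : Int))) from rfl,
          hlook p[n + 1] hmemj]

        have htail : (p.take (n + 2)).tail = (p.take (n + 1)).tail ++ [p[n + 1]] := by
          rw [show n + 2 = (n + 1) + 1 from rfl, List.take_succ_eq_append_getElem hjlt,
            List.tail_append_of_ne_nil]
          intro hnil
          rcases List.take_eq_nil_iff.mp hnil with h | h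
          · omega
          · rw [h] at hjlt; simp at hjlt
        rw [htail, hfall p[n + 1]]
        simp
      · simp only [if_neg hjlt]
        have hmin2 : min (n + 1 + 1) p.length = min (n + 1) p.length := by omega
        rw [hmin2, hmin]

-- B's program equals the same map of rows
lemma pvBuild_automata_alt_eq (pattern : String) :
    build_automata_alt pattern =
      (List.range (pattern.toList.length + 1)).map (pvRowA pattern.toList) := by
  unfold build_automata_alt
  dsimp only
  set p := pattern.toList
  have hrow0 : (PySem.Set.ofList p).map (fun c =>
      (String.ofList [c], if 0 < p.length ∧ p[0]? = some c then (1 : Int) else 0)) =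
      pvRowA p 0 := by
    rw [pvRowA]
    apply List.map_congr_left
    intro c _
    have h0 : p.take 0 ++ [c] = [c] := by simp
    rw [h0, pvF_singleton]
    by_cases hp : p[0]? = some c
    · have hpos : 0 < p.length := by
        rcases List.getElem?_eq_some_iff.mp hp with ⟨h, _⟩
        omega
      simp [hpos]
    · simp [hp]
  rw [hrow0, pvAlt_fold_inv p p.length (le_refl _)]

-- ===== VERDICT (by name: the statement is the Claim_ definition above) =====
theorem build_automata_spec : Claim_equal_build_automata := by
  intro pattern _
  unfold Spec_build_automata
  rw [pvBuild_automata_eq, pvBuild_automata_alt_eq]
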